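-- pv_equiv track=rewrite | github.com/Once-1296/WebDev-progress | Project_Linkly/app.py | increment_base58
-- ===== SOURCE A (Python) =====
-- def increment_base58(indices):
--     """Increment a base-58 array by 1 (like an odometer)."""
--     arr = indices[:]
--     i = len(arr) - 1
--     carry = 1
--     while i >= 0 and carry:
--         arr[i] = (arr[i] + carry) % 58
--         carry = 1 if arr[i] == 0 else 0
--         i -= 1
--     return arr
-- ===== SOURCE B (Python) =====
-- def increment_base58(indices):
--     """Increment a base-58 array by 1 (like an odometer)."""
--     n = len(indices)
--     k = 0                       # length of the trailing run that carries (digit % 58 == 57)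
--     for x in reversed(indices):
--         if x % 58 != 57:
--             break
--         k += 1
--     if k == n:                  # carry runs off the left end: everything wraps to 0
--         return [0] * n
--     m = n - k - 1
--     return indices[:m] + [(indices[m] + 1) % 58] + [0] * k
-- ===== Notes on version B (the rewrite author's own statement) =====
-- stated objective: alternative
-- what changed: B first measures the length k of the trailing carry run (digits with x % 58 == 57) and then rebuilds the result by slicing: untouched prefix + one incremented digit + k zeros, instead of A's in-place right-to-left write loop threading a carry accumulator.
import Mathlib
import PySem

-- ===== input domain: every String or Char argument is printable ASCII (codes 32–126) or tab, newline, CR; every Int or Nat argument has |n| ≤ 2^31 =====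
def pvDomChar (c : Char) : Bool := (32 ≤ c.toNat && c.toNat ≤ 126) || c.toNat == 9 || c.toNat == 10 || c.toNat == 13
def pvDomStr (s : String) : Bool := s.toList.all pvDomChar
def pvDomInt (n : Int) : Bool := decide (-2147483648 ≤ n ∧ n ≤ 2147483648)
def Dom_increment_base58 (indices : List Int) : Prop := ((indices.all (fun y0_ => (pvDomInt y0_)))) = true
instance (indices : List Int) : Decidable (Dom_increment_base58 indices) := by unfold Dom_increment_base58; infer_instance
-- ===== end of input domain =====

-- B rebuilds the result from a measured trailing-carry-run length by slicing (prefix ++ [incremented digit] ++ zeros)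
-- instead of A's right-to-left write loop threading a carry accumulator; objective: alternative (same O(n) cost).

-- ===== PORT A =====
-- A's while-loop: index i runs from len-1 down while carry; fuel n = i+1.
-- arr[i] = (arr[i]+1) % 58 (Python % with positive divisor = Lean Int %, i.e. emod); carry iff the new digit is 0.
def incLoopA : List Int → Nat → List Int
  | arr, 0 => arr
  | arr, n + 1 =>
    let v := (arr.getD n 0 + 1) % 58
    let arr' := arr.set n v
    if v == 0 then incLoopA arr' n else arr'

def increment_base58 (indices : List Int) : List Int :=
  incLoopA indices indices.length

-- ===== PORT B =====
-- the for-with-break over reversed(indices) computing k, the trailing-run length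
def runLenB : List Int → Nat
  | [] => 0
  | x :: rest => if x % 58 == 57 then runLenB rest + 1 else 0

def increment_base58_alt (indices : List Int) : List Int :=
  let n := indices.length
  let k := runLenB indices.reverse
  if k == n then List.replicate n 0
  else
    let m := n - k - 1
    indices.take m ++ [(indices.getD m 0 + 1) % 58] ++ List.replicate k 0

-- ===== PRECONDITION & SPEC =====
def Spec_increment_base58 (indices : List Int) (out : List Int) : Prop := out = increment_base58_alt indices
instance (indices : List Int) (out : List Int) : Decidable (Spec_increment_base58 indices out) := by unfold Spec_increment_base58; infer_instance

-- ===== CLAIM (what is proved, stated in full; the proofs are below) =====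
def Claim_equal_increment_base58 : Prop := ∀ (indices : List Int), Dom_increment_base58 indices → Spec_increment_base58 indices (increment_base58 indices)

-- ===== LEMMAS AND PROOFS =====

-- common reference function on the reversed digit list
def incRev : List Int → List Int
  | [] => []
  | x :: rest => if (x + 1) % 58 == 0 then 0 :: incRev rest else ((x + 1) % 58) :: rest

theorem mod_succ_iff (x : Int) : ((x + 1) % 58 == 0) = (x % 58 == 57) := by
  have h1 : (x + 1) % 58 = (x % 58 + 1) % 58 := by omega
  have h2 : 0 ≤ x % 58 := Int.emod_nonneg x (by norm_num)
  have h3 : x % 58 < 58 := Int.emod_lt_of_pos x (by norm_num)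
  rcases eq_or_ne (x % 58) 57 with h | h
  · simp [h1, h]
  · have : (x % 58 + 1) % 58 = x % 58 + 1 := Int.emod_eq_of_lt (by omega) (by omega)
    simp [h1, this]
    omega

theorem incLoopA_append {n : Nat} : ∀ (zs ts : List Int), n ≤ zs.length →
    incLoopA (zs ++ ts) n = incLoopA zs n ++ ts := by
  induction n with
  | zero => intro zs ts _; simp [incLoopA]
  | succ n ih =>
    intro zs ts h
    have hn : n < zs.length := by omega
    simp only [incLoopA, List.getD_append _ _ _ _ hn, List.set_append_left _ _ hn]
    split
    · exact ih _ _ (by simpa using hn.le)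
    · rfl

theorem incLoopA_eq_incRev : ∀ (arr : List Int),
    incLoopA arr arr.length = (incRev arr.reverse).reverse := by
  intro arr
  induction arr using List.reverseRecOn with
  | nil => simp [incLoopA, incRev]
  | append_singleton ys x ih =>
    have hget : (ys ++ [x]).getD ys.length 0 = x := by
      rw [List.getD_append_right ys [x] 0 ys.length (le_refl _)]
      simp [List.getD]
    have hset : ∀ v : Int, (ys ++ [x]).set ys.length v = ys ++ [v] := by
      intro v
      rw [List.set_append_right ys.length v (le_refl _)]
      simp
    have hlen : (ys ++ [x]).length = ys.length + 1 := by simp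
    rw [hlen]
    simp only [incLoopA, hget, hset]
    simp only [List.reverse_append, List.reverse_singleton, List.singleton_append, incRev]
    by_cases hv : ((x + 1) % 58 == 0) = true
    · rw [if_pos hv, if_pos hv]
      rw [incLoopA_append ys [(x + 1) % 58] (le_refl _)]
      have h0 : (x + 1) % 58 = 0 := by simpa using hv
      simp [h0, ih]
    · rw [if_neg hv, if_neg hv]
      simp

theorem runLenB_le (r : List Int) : runLenB r ≤ r.length := by
  induction r with
  | nil => simp [runLenB]
  | cons x rest ih =>
    simp only [runLenB, List.length_cons]
    split
    · omega
    · omega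

theorem incRev_all_carry : ∀ (r : List Int), runLenB r = r.length →
    incRev r = List.replicate r.length 0 := by
  intro r
  induction r with
  | nil => intro _; simp [incRev]
  | cons x rest ih =>
    intro h
    simp only [runLenB, List.length_cons] at h
    by_cases hx : (x % 58 == 57) = true
    · rw [if_pos hx] at h
      have := ih (by omega)
      simp [incRev, mod_succ_iff, hx, this, List.replicate_succ]
    · rw [if_neg hx] at h
      have := runLenB_le rest
      omega

-- B's slicing formula, stated on the reversed list r (so indices = r.reverse), equals incRev reversed
theorem alt_eq_incRev : ∀ (r : List Int),
    increment_base58_alt r.reverse = (incRev r).reverse := by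
  intro r
  induction r with
  | nil => simp [increment_base58_alt, incRev, runLenB]
  | cons x rest ih =>
    have hrev : (rest.reverse ++ [x]).reverse = x :: rest := by simp
    simp only [increment_base58_alt, List.reverse_cons, List.length_append,
      List.length_reverse, List.length_singleton, hrev]
    by_cases hx : (x % 58 == 57) = true
    · simp only [runLenB, if_pos hx]
      by_cases hall : runLenB rest = rest.length
      · rw [if_pos (by simp [hall])]
        simp only [incRev, mod_succ_iff, if_pos hx, List.reverse_cons]
        rw [incRev_all_carry rest hall]
        simp [List.replicate_succ']
      · have hlt : runLenB rest < rest.length := lt_of_le_of_ne (runLenB_le rest) hall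
        rw [if_neg (by simp; omega)]
        have hm : rest.length + 1 - (runLenB rest + 1) - 1 = rest.length - runLenB rest - 1 := by
          omega
        have hmlt : rest.length - runLenB rest - 1 < rest.reverse.length := by simp; omega
        rw [hm, List.take_append_of_le_length (by simp; omega),
            List.getD_append _ _ _ _ hmlt]
        have ihe := ih
        simp only [increment_base58_alt, List.length_reverse, List.reverse_reverse] at ihe
        rw [if_neg (by simpa using hall)] at ihe
        simp only [incRev, mod_succ_iff, if_pos hx, List.reverse_cons]
        rw [← ihe]
        simp [List.replicate_succ']
    · simp only [runLenB, if_neg hx]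
      rw [if_neg (by simp)]
      have hm : rest.length + 1 - 0 - 1 = rest.length := by omega
      rw [hm, List.take_append_of_le_length (by simp),
          List.getD_append_right rest.reverse [x] 0 rest.length (by simp)]
      simp only [incRev, mod_succ_iff, if_neg hx, List.reverse_cons]
      simp [List.getD]

-- ===== VERDICT (by name: the statement is the Claim_ definition above) =====
theorem increment_base58_spec : Claim_equal_increment_base58 := by
  unfold Claim_equal_increment_base58
  intro indices _
  unfold Spec_increment_base58
  rw [increment_base58, incLoopA_eq_incRev]
  have h := alt_eq_incRev indices.reverse
  rw [List.reverse_reverse] at h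
  rw [h]
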